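-- pv_equiv track=rewrite | github.com/wuyaqiang/Algorithm_Learn | 笔试题 记录/秋招/拼多多 - 寻梦计划/No_1.py | sorted_topN
-- ===== SOURCE A (Python) =====
-- def compare(n1, n2):
--
--     n1_is_even = (n1 % 2 == 0)
--     n2_is_even = (n2 % 2 == 0)
--
--     if n1_is_even == n2_is_even:
--         return True if n1 > n2 else False
--     elif n1_is_even:
--         return True
--     else:
--         return False
--
-- def sorted_topN(input_arr, N):
--
--     if not input_arr or len(input_arr) == 0:
--         return []
--
--     length = len(input_arr)
--     for i in range(length - 1):
--         for j in range(length - 1, i, -1):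
--             if compare(input_arr[j], input_arr[j-1]):
--                 input_arr[j], input_arr[j-1] = input_arr[j-1], input_arr[j]
--     return input_arr[ : N]
-- ===== SOURCE B (Python) =====
-- def sorted_topN(input_arr, N):
--     # Same return value as A; like A, the argument list ends up fully sorted in place.
--     if not input_arr:
--         return []
--     evens = sorted([x for x in input_arr if x % 2 == 0], reverse=True)
--     odds = sorted([x for x in input_arr if x % 2 != 0], reverse=True)
--     combined = evens + odds
--     input_arr[:] = combined
--     return combined[:N]
-- ===== Notes on version B (the rewrite author's own statement) =====
-- stated objective: faster
-- what changed: Replaced the comparator-driven bubble sort with a one-pass even/odd partition followed by two built-in descending sorts and concatenation, then the same [:N] slice (and the same in-place mutation of the argument).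
import Mathlib
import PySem

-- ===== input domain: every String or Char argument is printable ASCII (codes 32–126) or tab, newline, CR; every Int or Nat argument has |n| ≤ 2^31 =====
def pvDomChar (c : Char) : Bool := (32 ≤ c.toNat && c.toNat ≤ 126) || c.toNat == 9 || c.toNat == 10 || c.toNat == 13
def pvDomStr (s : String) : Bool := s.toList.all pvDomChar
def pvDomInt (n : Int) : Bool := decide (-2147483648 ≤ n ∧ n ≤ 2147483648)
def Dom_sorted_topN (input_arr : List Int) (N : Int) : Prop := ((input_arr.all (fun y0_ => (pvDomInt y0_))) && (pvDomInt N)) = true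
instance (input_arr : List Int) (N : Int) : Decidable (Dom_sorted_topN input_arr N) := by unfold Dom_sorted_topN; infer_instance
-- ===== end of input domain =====

-- B replaces A's comparator bubble sort by an even/odd partition plus two built-in
-- descending sorts (objective: faster). Both Pythons mutate input_arr in place to the
-- same fully sorted list; the equivalence proved here is about the RETURN value.

-- ===== PORT A =====
def compareA (n1 n2 : Int) : Bool :=
  let n1_is_even := PySem.Int.mod n1 2 == 0
  let n2_is_even := PySem.Int.mod n2 2 == 0
  if n1_is_even == n2_is_even then (if n1 > n2 then true else false)
  else if n1_is_even then true
  else false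

-- body of A's inner 'for j in range(length-1, i, -1)' loop (the swap via a tuple, as in Python)
def innerStep (arr : List Int) (j : Int) : List Int :=
  if compareA (PySem.List.pyGetD arr j 0) (PySem.List.pyGetD arr (j - 1) 0) then
    let pair := (PySem.List.pyGetD arr (j - 1) 0, PySem.List.pyGetD arr j 0)
    PySem.List.pySetD (PySem.List.pySetD arr j pair.1) (j - 1) pair.2
  else arr

-- body of A's outer 'for i in range(length-1)' loop
def innerLoop (length : Int) (arr : List Int) (i : Int) : List Int :=
  (PySem.List.pyRange (length - 1) i (-1)).foldl innerStep arr

def sorted_topN (input_arr : List Int) (N : Int) : List Int :=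
  if input_arr.isEmpty || input_arr.length == 0 then []
  else
    let length : Int := (input_arr.length : Int)
    let arr := (PySem.List.pyRange 0 (length - 1) 1).foldl (innerLoop length) input_arr
    PySem.List.slice arr none (some N)

-- ===== PORT B =====
def sorted_topN_alt (input_arr : List Int) (N : Int) : List Int :=
  if input_arr.isEmpty then []
  else
    let evens := PySem.List.sorted (input_arr.filter (fun x => PySem.Int.mod x 2 == 0)) (fun x => x) true
    let odds := PySem.List.sorted (input_arr.filter (fun x => !(PySem.Int.mod x 2 == 0))) (fun x => x) true
    let combined := evens ++ odds
    PySem.List.slice combined none (some N)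

-- ===== PRECONDITION & SPEC =====
def Spec_sorted_topN (input_arr : List Int) (N : Int) (out : List Int) : Prop := out = sorted_topN_alt input_arr N
instance (input_arr : List Int) (N : Int) (out : List Int) : Decidable (Spec_sorted_topN input_arr N out) := by unfold Spec_sorted_topN; infer_instance

-- ===== CLAIM (what is proved, stated in full; the proofs are below) =====
def Claim_equal_sorted_topN : Prop := ∀ (input_arr : List Int) (N : Int), Dom_sorted_topN input_arr N → Spec_sorted_topN input_arr N (sorted_topN input_arr N)

-- ===== LEMMAS AND PROOFS =====

-- the non-strict order A's comparator sorts by: a may stay before b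
def leA (a b : Int) : Prop := compareA b a = false

theorem compareA_asymm {a b : Int} (h : compareA a b = true) : compareA b a = false := by
  rcases Int.emod_two_eq a with ha | ha <;> rcases Int.emod_two_eq b with hb | hb <;>
    simp [compareA, ha, hb] at * <;> omega

theorem leA_trans {a b c : Int} (h1 : leA a b) (h2 : leA b c) : leA a c := by
  unfold leA at *
  rcases Int.emod_two_eq a with ha | ha <;> rcases Int.emod_two_eq b with hb | hb <;>
    rcases Int.emod_two_eq c with hc | hc <;> simp [compareA, ha, hb, hc] at * <;> omega

theorem leA_antisymm {a b : Int} (h1 : leA a b) (h2 : leA b a) : a = b := by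
  unfold leA at *
  rcases Int.emod_two_eq a with ha | ha <;> rcases Int.emod_two_eq b with hb | hb <;>
    simp [compareA, ha, hb] at * <;> omega

-- one back-to-front bubbling pass, as a structural recursion
def bpass : List Int → List Int
  | [] => []
  | [x] => [x]
  | x :: y :: rest =>
    match bpass (y :: rest) with
    | [] => [x]
    | z :: t => if compareA z x then z :: x :: t else x :: z :: t

theorem bpass_perm : ∀ xs : List Int, (bpass xs).Perm xs := by
  intro xs
  match xs with
  | [] => simp [bpass]
  | [x] => simp [bpass]
  | x :: y :: rest =>
    have ih := bpass_perm (y :: rest)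
    simp only [bpass]
    rcases hb : bpass (y :: rest) with _ | ⟨z, t⟩
    · rw [hb] at ih; exact absurd ih.symm (by simp)
    · rw [hb] at ih
      dsimp only
      split_ifs
      · exact (List.Perm.swap x z t).trans (ih.cons x)
      · exact ih.cons x

theorem getD_append_at (P q : List Int) (n : Nat) (d : Int) (h : P.length = n) :
    (P ++ q).getD n d = q.getD 0 d := by
  subst h
  simp [List.getD, List.getElem?_append_right]

theorem set_append_at (P : List Int) (a : Int) (q : List Int) (n : Nat) (v : Int) (h : P.length = n) :
    (P ++ a :: q).set n v = P ++ v :: q := by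
  subst h
  induction P with
  | nil => simp
  | cons p P ih => simp [ih]

theorem pyRange_neg_split (L k : Int) (h : k + 1 < L) :
    PySem.List.pyRange (L - 1) k (-1) = PySem.List.pyRange (L - 1) (k + 1) (-1) ++ [k + 1] := by
  rw [PySem.List.pyRange_neg_one_eq_reverse, PySem.List.pyRange_neg_one_eq_reverse,
    PySem.List.pyRange_one_cons (by omega : k + 1 < L - 1 + 1)]
  simp

theorem inner_eq_aux : ∀ (d : Nat) (k : Nat) (arr : List Int), k < arr.length → arr.length - 1 - k = d →
    innerLoop (arr.length : Int) arr (k : Int) = arr.take k ++ bpass (arr.drop k) := by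
  intro d
  induction d with
  | zero =>
    intro k arr h hd
    have hk : k = arr.length - 1 := by omega
    unfold innerLoop
    rw [PySem.List.pyRange_neg_one_eq_nil (by omega)]
    have hdrop : arr.drop k = [arr[k]] := by
      rw [List.drop_eq_getElem_cons h]
      have : arr.drop (k + 1) = [] := List.drop_eq_nil_of_le (by omega)
      rw [this]
    rw [List.foldl_nil, hdrop]
    show arr = arr.take k ++ bpass [arr[k]]
    simp [bpass, ← hdrop]
  | succ d ih =>
    intro k arr h hd
    have hk1 : k + 1 < arr.length := by omega
    unfold innerLoop
    rw [pyRange_neg_split _ _ (by omega), List.foldl_append]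
    have ihk := ih (k + 1) arr hk1 (by omega)
    unfold innerLoop at ihk
    push_cast at ihk ⊢
    rw [ihk]
    -- names
    have hdropk : arr.drop k = arr[k] :: arr.drop (k + 1) := List.drop_eq_getElem_cons h
    have hdne : arr.drop (k + 1) ≠ [] := by
      intro hnil
      have := List.length_drop (l := arr) (i := k + 1)
      rw [hnil] at this; simp at this; omega
    rcases hzt : bpass (arr.drop (k + 1)) with _ | ⟨z, t⟩
    · exact absurd (List.Perm.eq_nil (hzt ▸ (bpass_perm _)).symm) hdne
    have htake : arr.take (k + 1) = arr.take k ++ [arr[k]] := by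
      rw [List.take_add_one]
      congr 1
      simp [List.getElem?_eq_getElem h]
    rw [htake]
    have hlenP : (arr.take k).length = k := by simp; omega
    have hlenP1 : (arr.take k ++ [arr[k]]).length = k + 1 := by
      rw [List.length_append, hlenP]
      rfl
    have hB : arr.take k ++ [arr[k]] ++ z :: t = arr.take k ++ arr[k] :: z :: t := by
      rw [List.append_assoc]
      rfl
    have hcast1 : ((k : Int) + 1) = ((k + 1 : Nat) : Int) := by omega
    have hcast0 : ((k : Int) + 1 - 1) = ((k : Nat) : Int) := by omega
    have hget1 : PySem.List.pyGetD (arr.take k ++ [arr[k]] ++ z :: t) ((k : Int) + 1) 0 = z := by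
      rw [hcast1, PySem.List.pyGetD_natCast, getD_append_at _ _ _ _ hlenP1]
      rfl
    have hget0 : PySem.List.pyGetD (arr.take k ++ [arr[k]] ++ z :: t) ((k : Int) + 1 - 1) 0 = arr[k] := by
      rw [hcast0, PySem.List.pyGetD_natCast, hB, getD_append_at _ _ _ _ hlenP]
      rfl
    have hrhs : bpass (arr.drop k) = if compareA z arr[k] then z :: arr[k] :: t else arr[k] :: z :: t := by
      rw [hdropk]
      rcases hdd : arr.drop (k + 1) with _ | ⟨w, rest⟩
      · exact absurd hdd hdne
      · rw [hdd] at hzt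
        simp only [bpass, hzt]
    rw [hrhs]
    simp only [List.foldl_cons, List.foldl_nil]
    unfold innerStep
    rw [hget1, hget0]
    dsimp only
    split_ifs with hc
    · have hs1 : PySem.List.pySetD (arr.take k ++ [arr[k]] ++ z :: t) ((k : Int) + 1) arr[k]
          = arr.take k ++ [arr[k]] ++ arr[k] :: t := by
        rw [hcast1, PySem.List.pySetD_natCast, set_append_at _ _ _ _ _ hlenP1]
      rw [hs1]
      have hB2 : arr.take k ++ [arr[k]] ++ arr[k] :: t = arr.take k ++ arr[k] :: arr[k] :: t := by
        rw [List.append_assoc]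
        rfl
      rw [hcast0, PySem.List.pySetD_natCast, hB2, set_append_at _ _ _ _ _ hlenP]
    · exact hB

theorem bpass_min : ∀ (xs : List Int), xs ≠ [] →
    ∃ m t, bpass xs = m :: t ∧ ∀ y ∈ xs, leA m y := by
  intro xs hne
  match xs with
  | [x] => exact ⟨x, [], rfl, by intro y hy; simp at hy; subst hy; simp [leA, compareA]⟩
  | x :: y :: rest =>
    obtain ⟨z, t, hzt, hmin⟩ := bpass_min (y :: rest) (by simp)
    simp only [bpass, hzt]
    split_ifs with hc
    · refine ⟨z, x :: t, rfl, ?_⟩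
      intro w hw
      rcases List.mem_cons.1 hw with h | h
      · subst h; exact compareA_asymm hc
      · exact hmin w h
    · refine ⟨x, z :: t, rfl, ?_⟩
      intro w hw
      rcases List.mem_cons.1 hw with h | h
      · subst h; simp [leA, compareA]
      · exact leA_trans (a := x) (b := z) (by simpa [leA] using hc) (hmin w h)

theorem inner_eq (arr : List Int) (k : Nat) (h : k < arr.length) :
    innerLoop (arr.length : Int) arr (k : Int) = arr.take k ++ bpass (arr.drop k) :=
  inner_eq_aux _ k arr h rfl

theorem take_append_at (P q : List Int) (n i : Nat) (h : P.length = n) :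
    (P ++ q).take (n + i) = P ++ q.take i := by
  subst h
  induction P with
  | nil => simp
  | cons p P ih => simp [Nat.succ_add, ih]

theorem drop_append_at (P q : List Int) (n i : Nat) (h : P.length = n) :
    (P ++ q).drop (n + i) = q.drop i := by
  subst h
  induction P with
  | nil => simp
  | cons p P ih => simp [Nat.succ_add, ih]

theorem outer_inv (input : List Int) : ∀ (m : Nat), m + 1 ≤ input.length →
    ∀ res, res = (PySem.List.pyRange 0 (m : Int) 1).foldl (innerLoop (input.length : Int)) input →
      res.Perm input ∧ (res.take m).Pairwise leA ∧
        (∀ a ∈ res.take m, ∀ b ∈ res.drop m, leA a b) := by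
  intro m
  induction m with
  | zero =>
    intro hm res hres
    rw [PySem.List.pyRange_one_eq_nil (by omega), List.foldl_nil] at hres
    subst hres
    exact ⟨List.Perm.refl _, by simp, by simp⟩
  | succ m ih =>
    intro hm res hres
    obtain ⟨hp, hs, hcross⟩ := ih (by omega) _ rfl
    set prev := (PySem.List.pyRange 0 (m : Int) 1).foldl (innerLoop (input.length : Int)) input with hprev
    have hlen : prev.length = input.length := hp.length_eq
    have hmlt : m < prev.length := by omega
    have hcast : ((m + 1 : Nat) : Int) = (m : Int) + 1 := by omega
    rw [hcast, PySem.List.pyRange_one_succ_right (by positivity), List.foldl_append, ← hprev,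
      List.foldl_cons, List.foldl_nil, ← hlen, inner_eq prev m hmlt] at hres
    have hdne : prev.drop m ≠ [] := by
      intro hnil
      have := List.length_drop (l := prev) (i := m)
      rw [hnil] at this; simp at this; omega
    obtain ⟨z, t, hzt, hmin⟩ := bpass_min (prev.drop m) hdne
    have hbperm : (z :: t).Perm (prev.drop m) := hzt ▸ bpass_perm (prev.drop m)
    rw [hzt] at hres
    have hPlen : (prev.take m).length = m := by simp; omega
    have hzmem : z ∈ prev.drop m := hbperm.mem_iff.1 (by simp)
    refine ⟨?_, ?_, ?_⟩
    · rw [hres]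
      exact ((hbperm.append_left (prev.take m)).trans
        (by rw [List.take_append_drop])).trans hp
    · rw [hres]
      have : (prev.take m ++ z :: t).take (m + 1) = prev.take m ++ [z] := by
        rw [take_append_at _ _ _ 1 hPlen]
        rfl
      rw [this, List.pairwise_append]
      refine ⟨hs, by simp, ?_⟩
      intro a ha b hb
      simp only [List.mem_singleton] at hb
      subst hb
      exact hcross a ha _ hzmem
    · rw [hres]
      have ht : (prev.take m ++ z :: t).drop (m + 1) = t := by
        rw [drop_append_at _ _ _ 1 hPlen]
        rfl
      have htk : (prev.take m ++ z :: t).take (m + 1) = prev.take m ++ [z] := by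
        rw [take_append_at _ _ _ 1 hPlen]
        rfl
      rw [ht, htk]
      intro a ha b hb
      have hbmem : b ∈ prev.drop m := hbperm.mem_iff.1 (by simp [hb])
      rcases List.mem_append.1 ha with h | h
      · exact hcross a h b hbmem
      · simp only [List.mem_singleton] at h
        subst h
        exact hmin b hbmem

theorem a_sorted_perm (input : List Int) (hne : input ≠ []) :
    ∀ res, res = (PySem.List.pyRange 0 ((input.length : Int) - 1) 1).foldl (innerLoop (input.length : Int)) input →
      res.Perm input ∧ res.Pairwise leA := by
  intro res hres
  have hL : 1 ≤ input.length := List.length_pos_iff.2 hne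
  have hcast : ((input.length - 1 : Nat) : Int) = (input.length : Int) - 1 := by omega
  rw [← hcast] at hres
  obtain ⟨hp, hs, hcross⟩ := outer_inv input (input.length - 1) (by omega) res hres
  have hlen : res.length = input.length := hp.length_eq
  refine ⟨hp, ?_⟩
  have hsplit := List.take_append_drop (input.length - 1) res
  rw [← hsplit, List.pairwise_append]
  refine ⟨hs, ?_, hcross⟩
  rcases hd : res.drop (input.length - 1) with _ | ⟨b, bs⟩
  · simp
  · have hl := congrArg List.length hd
    simp only [List.length_drop, hlen, List.length_cons] at hl
    have hbs : bs = [] := List.length_eq_zero_iff.1 (by omega)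
    subst hbs
    simp

theorem modA_eq (a : Int) : PySem.Int.mod a 2 = a % 2 :=
  PySem.Int.mod_eq_emod_of_pos (by norm_num)

theorem leA_even_even {a b : Int} (ha : PySem.Int.mod a 2 = 0) (hb : PySem.Int.mod b 2 = 0)
    (hge : b ≤ a) : leA a b := by
  rw [modA_eq] at ha hb
  simp [leA, compareA]
  split_ifs <;> omega

theorem leA_odd_odd {a b : Int} (ha : ¬ PySem.Int.mod a 2 = 0) (hb : ¬ PySem.Int.mod b 2 = 0)
    (hge : b ≤ a) : leA a b := by
  rw [modA_eq] at ha hb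
  simp only [leA, compareA, modA_eq, beq_iff_eq]
  split_ifs <;> simp_all
  omega

theorem leA_even_odd {a b : Int} (ha : PySem.Int.mod a 2 = 0) (hb : ¬ PySem.Int.mod b 2 = 0) :
    leA a b := by
  rw [modA_eq] at ha hb
  simp [leA, compareA]
  split_ifs <;> omega

theorem b_sorted_perm (input : List Int) :
    ∀ comb, comb = PySem.List.sorted (input.filter (fun x => PySem.Int.mod x 2 == 0)) (fun x => x) true ++
        PySem.List.sorted (input.filter (fun x => !(PySem.Int.mod x 2 == 0))) (fun x => x) true →
      comb.Perm input ∧ comb.Pairwise leA := by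
  intro comb hcomb
  subst hcomb
  constructor
  · exact (((PySem.List.sorted_perm _ _ _).append (PySem.List.sorted_perm _ _ _)).trans
      (List.filter_append_perm _ input))
  · rw [List.pairwise_append]
    refine ⟨?_, ?_, ?_⟩
    · refine List.Pairwise.imp_of_mem ?_ (PySem.List.sorted_pairwise_rev _ _)
      intro a b ha hb hge
      rw [PySem.List.mem_sorted] at ha hb
      have ha' := (List.mem_filter.1 ha).2
      have hb' := (List.mem_filter.1 hb).2
      simp only [beq_iff_eq] at ha' hb'
      exact leA_even_even ha' hb' hge
    · refine List.Pairwise.imp_of_mem ?_ (PySem.List.sorted_pairwise_rev _ _)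
      intro a b ha hb hge
      rw [PySem.List.mem_sorted] at ha hb
      have ha' := (List.mem_filter.1 ha).2
      have hb' := (List.mem_filter.1 hb).2
      simp only [Bool.not_eq_true', beq_eq_false_iff_ne, ne_eq] at ha' hb'
      exact leA_odd_odd ha' hb' hge
    · intro a ha b hb
      rw [PySem.List.mem_sorted] at ha hb
      have ha' := (List.mem_filter.1 ha).2
      have hb' := (List.mem_filter.1 hb).2
      simp only [beq_iff_eq] at ha'
      simp only [Bool.not_eq_true', beq_eq_false_iff_ne, ne_eq] at hb'
      exact leA_even_odd ha' hb'

-- ===== VERDICT (by name: the statement is the Claim_ definition above) =====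
theorem sorted_topN_spec : Claim_equal_sorted_topN := by
  intro input N _
  unfold Spec_sorted_topN sorted_topN sorted_topN_alt
  rcases input with _ | ⟨x, xs⟩
  · simp
  · have hne : (x :: xs) ≠ [] := by simp
    obtain ⟨hpa, hsa⟩ := a_sorted_perm (x :: xs) hne _ rfl
    obtain ⟨hpb, hsb⟩ := b_sorted_perm (x :: xs) _ rfl
    have heq : ((PySem.List.pyRange 0 (((x :: xs).length : Int) - 1) 1).foldl (innerLoop ((x :: xs).length : Int)) (x :: xs)) =
        (PySem.List.sorted ((x :: xs).filter (fun x => PySem.Int.mod x 2 == 0)) (fun x => x) true ++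
          PySem.List.sorted ((x :: xs).filter (fun x => !(PySem.Int.mod x 2 == 0))) (fun x => x) true) :=
      List.Perm.eq_of_pairwise (fun a b _ _ h1 h2 => leA_antisymm h1 h2) hsa hsb (hpa.trans hpb.symm)
    simp only [List.length_cons] at heq ⊢
    rw [heq]
    simp
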